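-- pv_equiv track=rewrite | github.com/DOYOUNG-0314/Algorithm | BAEKJOON/1652.py | count_horizontal
-- ===== SOURCE A (Python) =====
-- def count_horizontal(room):
--     count = 0
--     for row in room:
--         empty = 0
--         for cell in row:
--             if cell == '.':
--                 empty += 1
--             else:
--                 if empty >= 2:
--                     count += 1
--                 empty = 0
--         if empty >= 2:
--             count += 1
--     return count
-- ===== SOURCE B (Python) =====
-- def count_horizontal(room):
--     # A maximal '.'-run of length >= 2 starts exactly where the pattern
--     # (non-dot, '.', '.') occurs in the sentinel-padded row; count those
--     # pattern occurrences with a stateless zip over three shifted views.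
--     total = 0
--     for row in room:
--         pad = '/' + ''.join(row)
--         total += sum(1 for a, b, c in zip(pad, pad[1:], pad[2:])
--                      if a != '.' and b == '.' and c == '.')
--     return total
-- ===== Notes on version B (the rewrite author's own statement) =====
-- stated objective: alternative
-- what changed: Replaces the stateful running empty-run counter (with boundary and trailing tests) by a stateless pattern match: pad each row with a sentinel non-dot and count occurrences of the 3-char window (non-dot, '.', '.'), i.e. run starts, via zip over shifted views; no run length is ever maintained.
import Mathlib
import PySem

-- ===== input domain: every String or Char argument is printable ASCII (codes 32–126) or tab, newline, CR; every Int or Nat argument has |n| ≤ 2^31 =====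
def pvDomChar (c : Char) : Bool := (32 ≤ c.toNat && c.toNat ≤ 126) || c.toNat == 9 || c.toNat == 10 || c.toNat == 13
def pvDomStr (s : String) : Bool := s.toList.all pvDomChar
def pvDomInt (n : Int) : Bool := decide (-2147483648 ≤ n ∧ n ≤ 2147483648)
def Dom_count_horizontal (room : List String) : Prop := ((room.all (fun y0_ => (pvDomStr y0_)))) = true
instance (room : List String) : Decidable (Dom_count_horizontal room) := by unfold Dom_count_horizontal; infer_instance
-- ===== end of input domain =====

-- B replaces A's stateful running empty-run counter by a stateless sentinel-padded
-- sliding-window count of the pattern (non-dot, '.', '.') — run starts; same cost.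


-- ===== PORT A =====
-- inner loop of A over one row: state is `empty`; returns the count contributed by
-- the rest of the row (including the trailing `if empty >= 2` check)
def rowA : List Char → Int → Int
  | [], empty => if empty ≥ 2 then 1 else 0
  | c :: cs, empty =>
      if c = '.' then rowA cs (empty + 1)
      else (if empty ≥ 2 then 1 else 0) + rowA cs 0

def count_horizontal (room : List String) : Int :=
  room.foldl (fun count row => count + rowA row.toList 0) 0

-- ===== PORT B =====
-- pad = '/' + row; sum(1 for a,b,c in zip(pad, pad[1:], pad[2:]) if a!='.' and b=='.' and c=='.')
def count_horizontal_alt (room : List String) : Int :=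
  room.foldl (fun total row =>
    let pad := '/' :: row.toList
    total + (((pad.zip (pad.drop 1)).zip (pad.drop 2)).countP
      (fun t => t.1.1 != '.' && t.1.2 == '.' && t.2 == '.') : Int)) 0

-- ===== PRECONDITION & SPEC =====
def Spec_count_horizontal (room : List String) (out : Int) : Prop := out = count_horizontal_alt room
instance (room : List String) (out : Int) : Decidable (Spec_count_horizontal room out) := by unfold Spec_count_horizontal; infer_instance

-- ===== CLAIM (what is proved, stated in full; the proofs are below) =====
def Claim_equal_count_horizontal : Prop := ∀ (room : List String), Dom_count_horizontal room → Spec_count_horizontal room (count_horizontal room)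

-- ===== LEMMAS AND PROOFS =====

-- h a b cs: number of pattern windows (non-dot, '.', '.') in a::b::cs whose third
-- character lies in cs (a, b are the two characters of look-behind)
def h : Char → Char → List Char → Int
  | _, _, [] => 0
  | a, b, c :: cs => (if a ≠ '.' ∧ b = '.' ∧ c = '.' then 1 else 0) + h b c cs

-- h only looks at whether the look-behind characters are dots
theorem h_congr (cs : List Char) (a a' b b' : Char)
    (ha : (a = '.') ↔ (a' = '.')) (hb : (b = '.') ↔ (b' = '.')) :
    h a b cs = h a' b' cs := by
  induction cs generalizing a a' b b' with
  | nil => rfl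
  | cons c cs ih =>
    simp only [h]
    rw [ih b b' c c hb Iff.rfl]
    congr 1
    by_cases hc : c = '.' <;> by_cases h1 : a = '.' <;> by_cases h2 : b = '.' <;>
      simp_all

-- when the second look-behind char is not a dot, the first is irrelevant
theorem h_first_irrel (cs : List Char) (b b' c : Char) (hc : c ≠ '.') :
    h b c cs = h b' c cs := by
  cases cs with
  | nil => rfl
  | cons d cs => simp [h, hc]

-- B's zip-window count of a two-char-prefixed list is h
theorem zc_eq_h (cs : List Char) (a b : Char) :
    ((((a :: b :: cs).zip ((a :: b :: cs).drop 1)).zip ((a :: b :: cs).drop 2)).countP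
      (fun t => t.1.1 != '.' && t.1.2 == '.' && t.2 == '.') : Int) = h a b cs := by
  induction cs generalizing a b with
  | nil => rfl
  | cons c cs ih =>
    simp only [List.drop, List.zip_cons_cons, List.countP_cons, h]
    rw [← ih b c]
    simp only [List.drop, List.zip_cons_cons]
    push_cast
    by_cases h1 : a = '.' <;> by_cases h2 : b = '.' <;> by_cases h3 : c = '.' <;>
      simp_all [add_comm]

-- B's per-row count with the single sentinel
theorem zc_pad (cs : List Char) :
    ((((('/' :: cs)).zip (('/' :: cs).drop 1)).zip (('/' :: cs).drop 2)).countP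
      (fun t => t.1.1 != '.' && t.1.2 == '.' && t.2 == '.') : Int) = h '/' '/' cs := by
  cases cs with
  | nil => rfl
  | cons c cs =>
    rw [zc_eq_h cs '/' c]
    simp only [h]
    rw [if_neg (by intro hx; exact (by decide : ('/' : Char) ≠ '.') hx.2.1)]
    ring

-- the key invariant: A's stateful scan equals the window count; the two
-- look-behind characters a, b reflect the run state n
theorem rowA_eq_h (cs : List Char) (n : Nat) (a b : Char)
    (ha : (a = '.') ↔ 2 ≤ n) (hb : (b = '.') ↔ 1 ≤ n) :
    rowA cs (n : Int) = (if 2 ≤ n then 1 else 0) + h a b cs := by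
  induction cs generalizing n a b with
  | nil =>
    simp only [rowA, h]
    by_cases h2 : 2 ≤ n
    · have : (2:Int) ≤ (n:Int) := by exact_mod_cast h2
      simp [h2, this]
    · have : ¬ ((n:Int) ≥ 2) := by exact_mod_cast h2
      simp [h2, this]
  | cons c cs ih =>
    by_cases hc : c = '.'
    · subst hc
      rw [rowA, if_pos rfl,
          show ((n : Int) + 1) = ((n + 1 : Nat) : Int) from by push_cast; ring,
          ih (n + 1) b '.' (by rw [hb]; omega) (by simp)]
      simp only [h]
      by_cases hn1 : 1 ≤ n
      · have hb' : b = '.' := hb.mpr hn1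
        by_cases hn2 : 2 ≤ n
        · have ha' : a = '.' := ha.mpr hn2
          simp [hn2, show 2 ≤ n + 1 from by omega, ha', hb']
        · have ha' : a ≠ '.' := fun hx => hn2 (ha.mp hx)
          simp [hn2, show 2 ≤ n + 1 from by omega, ha', hb']
          try ring
      · have hb' : b ≠ '.' := fun hx => hn1 (hb.mp hx)
        simp [show ¬ 2 ≤ n from by omega, show ¬ 2 ≤ n + 1 from by omega, hb']
    · have hcd : (c = '.') ↔ (('/' : Char) = '.') := by
        constructor
        · intro hx; exact absurd hx hc
        · intro hx; exact absurd hx (by decide)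
      rw [rowA, if_neg hc,
          show (0 : Int) = ((0 : Nat) : Int) from rfl,
          ih 0 '/' '/' (by decide) (by decide),
          if_neg (show ¬ 2 ≤ 0 from by omega)]
      simp only [h]
      rw [if_neg (show ¬ (a ≠ '.' ∧ b = '.' ∧ c = '.') from fun hx => hc hx.2.2),
          h_first_irrel cs b '/' c hc,
          h_congr cs '/' '/' c '/' Iff.rfl hcd]
      by_cases h2 : 2 ≤ n
      · rw [if_pos (show ((n:Int) ≥ 2) from by exact_mod_cast h2), if_pos h2]
        try ring
      · rw [if_neg (show ¬ ((n:Int) ≥ 2) from by exact_mod_cast h2), if_neg h2]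
        try ring

theorem row_eq (cs : List Char) :
    rowA cs 0 = ((((('/' :: cs)).zip (('/' :: cs).drop 1)).zip (('/' :: cs).drop 2)).countP
      (fun t => t.1.1 != '.' && t.1.2 == '.' && t.2 == '.') : Int) := by
  rw [zc_pad, show (0 : Int) = ((0 : Nat) : Int) from rfl,
      rowA_eq_h cs 0 '/' '/' (by decide) (by decide)]
  simp

theorem foldl_eq (room : List String) (acc : Int) :
    room.foldl (fun count row => count + rowA row.toList 0) acc
      = room.foldl (fun total row =>
          let pad := '/' :: row.toList
          total + (((pad.zip (pad.drop 1)).zip (pad.drop 2)).countP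
            (fun t => t.1.1 != '.' && t.1.2 == '.' && t.2 == '.') : Int)) acc := by
  induction room generalizing acc with
  | nil => rfl
  | cons r rs ih =>
    simp only [List.foldl_cons]
    rw [row_eq r.toList]
    exact ih _

-- ===== VERDICT (by name: the statement is the Claim_ definition above) =====
theorem count_horizontal_spec : Claim_equal_count_horizontal := by
  intro room _
  show count_horizontal room = count_horizontal_alt room
  rw [count_horizontal, count_horizontal_alt, foldl_eq]
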